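-- pv_equiv track=rewrite | github.com/QS8459/test_task_01 | python/src/parser/utils.py | find_cat
-- ===== SOURCE A (Python) =====
-- def find_cat(cats, id):
--     cat_d:dict = {};
--     for item in cats:
--         if item.get('id') == id:
--             cat_d = item;
--     res_str = hierarchy(cats, cat_d);
--
--     divided = res_str.split('/')[::-1];
--     res = {}
--     if 0 < len(divided) :
--         res['lvl1'] = divided[0];
--     if 2 <= len(divided):
--         res['lvl1'] = divided[0]
--         res['lvl2'] = divided[1];
--     if 3 <= len(divided):
--         res['lvl1'] = divided[0]
--         res['lvl2'] = divided[1]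
--         res['lvl3'] = divided[2];
--     if 4 <= len(divided) :
--         res['lvl1'] = divided[0]
--         res['lvl2'] = divided[1]
--         res['lvl3'] = divided[2];
--         res['lvlr']= '/'.join(divided[3::])
--     return res;
--
-- def hierarchy(a, cat_d:dict = {}):
--
--     string = cat_d.get('name');
--     parent = cat_d.get('parentId')
--     inner:dict = {};
--     if parent is not None:
--         for item in a:
--             if item.get('id') == parent:
--                 inner = item
--         string += '/' + hierarchy(a,inner)
--     return string if string is not None else '';
-- ===== SOURCE B (Python) =====
-- def find_cat(cats, id):
--     # iterative re-implementation: walk the parent chain with a loop instead of recursion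
--     target = {}
--     for item in cats:
--         if item.get('id') == id:
--             target = item
--     names = []
--     cur = target
--     while True:
--         names.append(cur.get('name') or '')
--         parent = cur.get('parentId')
--         if parent is None:
--             break
--         nxt = {}
--         for item in cats:
--             if item.get('id') == parent:
--                 nxt = item
--         cur = nxt
--     divided = '/'.join(names).split('/')
--     divided.reverse()
--     res = {'lvl1': divided[0]}
--     if len(divided) >= 2:
--         res['lvl2'] = divided[1]
--     if len(divided) >= 3:
--         res['lvl3'] = divided[2]
--     if len(divided) >= 4:
--         res['lvlr'] = '/'.join(divided[3:])
--     return res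
-- ===== Notes on version B (the rewrite author's own statement) =====
-- stated objective: simpler
-- what changed: Replaces A's recursive string-accumulating hierarchy() with an iterative while-loop that collects the chain's names into a list (joined/split once), and builds the level dict with single unconditional assignments instead of A's cascading re-assignments.
import Mathlib
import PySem

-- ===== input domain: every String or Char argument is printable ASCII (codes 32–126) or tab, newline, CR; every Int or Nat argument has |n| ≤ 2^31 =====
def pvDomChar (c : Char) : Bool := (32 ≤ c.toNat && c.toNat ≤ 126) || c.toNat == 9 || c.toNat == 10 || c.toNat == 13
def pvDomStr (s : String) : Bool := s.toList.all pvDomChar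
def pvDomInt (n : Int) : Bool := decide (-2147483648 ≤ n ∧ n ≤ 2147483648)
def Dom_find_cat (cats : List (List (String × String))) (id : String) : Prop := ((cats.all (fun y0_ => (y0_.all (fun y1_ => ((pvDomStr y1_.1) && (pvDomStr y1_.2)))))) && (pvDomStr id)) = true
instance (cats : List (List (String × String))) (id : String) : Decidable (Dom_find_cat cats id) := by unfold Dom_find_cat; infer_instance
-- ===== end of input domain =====

-- B replaces A's recursive string-building `hierarchy` by an iterative walk of the
-- parent chain collecting the names in a list (joined/split once at the end), and
-- builds the result dict with single unconditional assignments instead of A's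
-- cascading re-assignments; objective: simpler.

-- ===== PORT A =====
-- item.get(k) on a dict (association list, first match)
def pvGet (item : List (String × String)) (k : String) : Option String :=
  (PySem.Dict.mk item).get? k

-- the `for item in cats: if item.get('id') == key: acc = item` loop (keeps the LAST match; {} if none)
def pvSelect (cats : List (List (String × String))) (key : String) : List (String × String) :=
  cats.foldl (fun acc item => if pvGet item "id" = some key then item else acc) []

-- A's `hierarchy`; fuel (unused by the Python) only makes the recursion total:
-- `none` = Python raises (TypeError on a None name under a parent, RecursionError on a cyclic chain)
def hierarchyA (fuel : Nat) (a : List (List (String × String))) (cat_d : List (String × String)) : Option String :=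
  match fuel with
  | 0 => none
  | fuel + 1 =>
    let string := pvGet cat_d "name"
    let parent := pvGet cat_d "parentId"
    match parent with
    | none => some (string.getD "")
    | some p =>
      match string with
      | none => none                      -- TypeError: None + str
      | some s =>
        let inner := pvSelect a p
        (hierarchyA fuel a inner).map (fun h => s ++ "/" ++ h)

def find_cat (cats : List (List (String × String))) (id : String) : List (String × String) :=
  let cat_d := pvSelect cats id
  match hierarchyA (cats.length + 1) cats cat_d with
  | none => []                            -- unreachable under Pre_find_cat (Python raises here)
  | some res_str =>
    let divided := ((PySem.Str.split? res_str "/").getD []).reverse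
    let res : PySem.Dict String String := PySem.Dict.mk []
    let res := if 0 < divided.length then res.insert "lvl1" (PySem.List.pyGetD divided 0 "") else res
    let res := if 2 ≤ divided.length then
        (res.insert "lvl1" (PySem.List.pyGetD divided 0 "")).insert "lvl2" (PySem.List.pyGetD divided 1 "")
      else res
    let res := if 3 ≤ divided.length then
        ((res.insert "lvl1" (PySem.List.pyGetD divided 0 "")).insert "lvl2" (PySem.List.pyGetD divided 1 "")).insert "lvl3" (PySem.List.pyGetD divided 2 "")
      else res
    let res := if 4 ≤ divided.length then
        (((res.insert "lvl1" (PySem.List.pyGetD divided 0 "")).insert "lvl2" (PySem.List.pyGetD divided 1 "")).insert "lvl3" (PySem.List.pyGetD divided 2 "")).insert "lvlr" (PySem.Str.join "/" (PySem.List.slice divided (some 3) none))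
      else res
    res.items

-- ===== PORT B =====
-- B's while-loop: collect the names along the parent chain (target → root);
-- fuel only makes the loop total (B's Python loops forever on a cyclic chain, outside Pre_)
def pvChain (fuel : Nat) (cats : List (List (String × String))) (cur : List (String × String)) : List String :=
  match fuel with
  | 0 => []
  | fuel + 1 =>
    let name := (pvGet cur "name").getD ""
    match pvGet cur "parentId" with
    | none => [name]
    | some p => name :: pvChain fuel cats (pvSelect cats p)

def find_cat_alt (cats : List (List (String × String))) (id : String) : List (String × String) :=
  let names := pvChain (cats.length + 1) cats (pvSelect cats id)
  let divided := ((PySem.Str.split? (PySem.Str.join "/" names) "/").getD []).reverse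
  let res := (PySem.Dict.mk ([] : List (String × String))).insert "lvl1" (PySem.List.pyGetD divided 0 "")
  let res := if 2 ≤ divided.length then res.insert "lvl2" (PySem.List.pyGetD divided 1 "") else res
  let res := if 3 ≤ divided.length then res.insert "lvl3" (PySem.List.pyGetD divided 2 "") else res
  let res := if 4 ≤ divided.length then res.insert "lvlr" (PySem.Str.join "/" (PySem.List.slice divided (some 3) none)) else res
  res.items

-- ===== PRECONDITION & SPEC =====
-- chainOk follows only the id/parentId links of the input (never the computed output):
-- it checks that the parent chain of the selected item reaches a root without cycling
-- (else A's recursion raises RecursionError) and that every chain item that still has a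
-- parent has a name (else A raises TypeError: None + str). A chain that terminates at
-- all terminates within cats.length + 1 steps, so the bound is not a size restriction.
def chainOk (fuel : Nat) (cats : List (List (String × String))) (cur : List (String × String)) : Bool :=
  match fuel with
  | 0 => false
  | fuel + 1 =>
    match pvGet cur "parentId" with
    | none => true
    | some p => (pvGet cur "name").isSome && chainOk fuel cats (pvSelect cats p)

-- Pre_ excludes exactly the inputs on which the Python A raises (TypeError or RecursionError)
def Pre_find_cat (cats : List (List (String × String))) (id : String) : Prop :=
  chainOk (cats.length + 1) cats (pvSelect cats id) = true
instance (cats : List (List (String × String))) (id : String) : Decidable (Pre_find_cat cats id) := by unfold Pre_find_cat; infer_instance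

def pvWitness_find_cat : (List (List (String × String))) × String :=
  ([[("id", "2"), ("name", "leaf"), ("parentId", "1")], [("id", "1"), ("name", "root")]], "2")

def Spec_find_cat (cats : List (List (String × String))) (id : String) (out : List (String × String)) : Prop := out = find_cat_alt cats id
instance (cats : List (List (String × String))) (id : String) (out : List (String × String)) : Decidable (Spec_find_cat cats id out) := by unfold Spec_find_cat; infer_instance

-- ===== CLAIM (what is proved, stated in full; the proofs are below) =====
def Claim_equal_find_cat : Prop := ∀ (cats : List (List (String × String))) (id : String), Dom_find_cat cats id → Pre_find_cat cats id → Spec_find_cat cats id (find_cat cats id)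

-- ===== LEMMAS AND PROOFS =====
lemma strJoin_singleton (s : String) : PySem.Str.join "/" [s] = s := by
  rw [← String.toList_inj]
  simp [PySem.Str.toList_join, PySem.Chars.join_singleton]

lemma strJoin_cons (s t : String) (rest : List String) :
    PySem.Str.join "/" (s :: t :: rest) = s ++ "/" ++ PySem.Str.join "/" (t :: rest) := by
  rw [← String.toList_inj]
  simp [PySem.Str.toList_join, PySem.Chars.join_cons_cons]

lemma chain_ne_nil (fuel : Nat) (cats : List (List (String × String))) (cur : List (String × String))
    (h : chainOk fuel cats cur = true) : pvChain fuel cats cur ≠ [] := by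
  cases fuel with
  | zero => simp [chainOk] at h
  | succ n =>
    simp only [pvChain]
    cases pvGet cur "parentId" <;> simp

lemma hierarchyA_eq_join (fuel : Nat) (cats : List (List (String × String))) :
    ∀ cur, chainOk fuel cats cur = true →
      hierarchyA fuel cats cur = some (PySem.Str.join "/" (pvChain fuel cats cur)) := by
  induction fuel with
  | zero => intro cur h; simp [chainOk] at h
  | succ n ih =>
    intro cur h
    simp only [chainOk] at h
    simp only [hierarchyA, pvChain]
    cases hp : pvGet cur "parentId" with
    | none =>
      simp [strJoin_singleton]
    | some p =>
      rw [hp] at h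
      simp only [Bool.and_eq_true, Option.isSome_iff_exists] at h
      obtain ⟨⟨s, hs⟩, hrec⟩ := h
      simp only [hs]
      rw [ih _ hrec]
      obtain ⟨t, rest, hcons⟩ : ∃ t rest, pvChain n cats (pvSelect cats p) = t :: rest := by
        cases hc : pvChain n cats (pvSelect cats p) with
        | nil => exact absurd hc (chain_ne_nil n cats _ hrec)
        | cons t rest => exact ⟨t, rest, rfl⟩
      rw [hcons, strJoin_cons]
      simp

lemma splitOn_go_ne_nil (sep : List Char) :
    ∀ (fuel : Nat) (l cur : List Char) (acc : List (List Char)),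
      PySem.Chars.splitOn.go sep fuel l cur acc ≠ [] := by
  intro fuel
  induction fuel with
  | zero => intro l cur acc; simp [PySem.Chars.splitOn.go]
  | succ n ih =>
    intro l cur acc
    cases l with
    | nil => simp [PySem.Chars.splitOn.go]
    | cons c rest =>
      rw [PySem.Chars.splitOn.go]
      split
      · exact ih _ _ _
      · exact ih _ _ _

lemma split_ne_nil (s : String) : ((PySem.Str.split? s "/").getD []) ≠ [] := by
  simp [PySem.Str.split?, PySem.Chars.split?, PySem.Chars.splitOn]
  intro h
  exact splitOn_go_ne_nil _ _ _ _ _ h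

lemma dictBuild_eq (s : String) :
    (let divided := ((PySem.Str.split? s "/").getD []).reverse
     let res : PySem.Dict String String := PySem.Dict.mk []
     let res := if 0 < divided.length then res.insert "lvl1" (PySem.List.pyGetD divided 0 "") else res
     let res := if 2 ≤ divided.length then
         (res.insert "lvl1" (PySem.List.pyGetD divided 0 "")).insert "lvl2" (PySem.List.pyGetD divided 1 "")
       else res
     let res := if 3 ≤ divided.length then
         ((res.insert "lvl1" (PySem.List.pyGetD divided 0 "")).insert "lvl2" (PySem.List.pyGetD divided 1 "")).insert "lvl3" (PySem.List.pyGetD divided 2 "")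
       else res
     let res := if 4 ≤ divided.length then
         (((res.insert "lvl1" (PySem.List.pyGetD divided 0 "")).insert "lvl2" (PySem.List.pyGetD divided 1 "")).insert "lvl3" (PySem.List.pyGetD divided 2 "")).insert "lvlr" (PySem.Str.join "/" (PySem.List.slice divided (some 3) none))
       else res
     res.items)
    =
    (let divided := ((PySem.Str.split? s "/").getD []).reverse
     let res := (PySem.Dict.mk ([] : List (String × String))).insert "lvl1" (PySem.List.pyGetD divided 0 "")
     let res := if 2 ≤ divided.length then res.insert "lvl2" (PySem.List.pyGetD divided 1 "") else res
     let res := if 3 ≤ divided.length then res.insert "lvl3" (PySem.List.pyGetD divided 2 "") else res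
     let res := if 4 ≤ divided.length then res.insert "lvlr" (PySem.Str.join "/" (PySem.List.slice divided (some 3) none)) else res
     res.items) := by
  obtain ⟨a, t, ht⟩ : ∃ a t, ((PySem.Str.split? s "/").getD []).reverse = a :: t := by
    cases hc : ((PySem.Str.split? s "/").getD []).reverse with
    | nil => exact absurd (by simpa using hc) (split_ne_nil s)
    | cons a t => exact ⟨a, t, rfl⟩
  simp only [ht]
  match t with
  | [] => simp [PySem.Dict.insert]
  | [b] => simp [PySem.Dict.insert]
  | [b, c] => simp [PySem.Dict.insert]
  | b :: c :: d :: r => simp [PySem.Dict.insert]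

-- ===== VERDICT (by name: the statement is the Claim_ definition above) =====
theorem find_cat_spec : Claim_equal_find_cat := by
  intro cats id _hdom hpre
  simp only [Spec_find_cat, find_cat, find_cat_alt]
  rw [hierarchyA_eq_join _ _ _ hpre]
  exact dictBuild_eq (PySem.Str.join "/" (pvChain (cats.length + 1) cats (pvSelect cats id)))
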